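-- pv_equiv track=rewrite | github.com/shendurelab/DTT | Section_1/Process_DebrisSeqTAPE.py | TAPE_correction
-- ===== SOURCE A (Python) =====
-- def TAPE_correction(plate_loc, Seq_table):
--
--     # ===========================================================
--     ## Correcting TargetBC and processing sequential insertion
--     # ===========================================================
--
--     # Overall reads
--     Total_reads = 0
--     Seq_table2 = {}
--     Seq_table3 = {}
--     TAPE_table = {}
--
--
--     for k,nRead in Seq_table.items():
--         row = k.split(',')
--         TargetBC_correction = [row[0]]
--         #TargetBC_correction = find_sequences_within_edit_distance(TargetBC, TargetBC_C5)
--         if len(TargetBC_correction) == 1: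
--             if row[1][3:] == 'GGAT':
--                 if row[2][3:] == 'GGAT':
--                     if row[3][3:] == 'GGAT':
--                         if row[4][3:] == 'GGAT':
--                             if row[5][3:] == 'GGAT':
--                                 if row[6][3:] == 'GGAT':
--                                     TAPE = ','.join(row[1:7])
--                                 else:
--                                     TAPE = ','.join(row[1:6])+',None'
--                             else:
--                                 TAPE = ','.join(row[1:5])+',None,None'
--                         else:
--                             TAPE = ','.join(row[1:4])+',None,None,None'
--                     else:
--                         TAPE = ','.join(row[1:3])+',None,None,None,None'
--                 else:
--                     TAPE = ','.join(row[1:2])+',None,None,None,None,None'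
--
--                 TAPE = plate_loc+','+TargetBC_correction[0]+'-'+row[1][:3]+','+TAPE
--                 Total_reads += nRead
--                 row = TAPE.split(',')
--
--
--             else:
--                 TAPE = plate_loc+','+TargetBC_correction[0]+'-Non'+',None,None,None,None,None,None'
--                 Total_reads += nRead
--                 row = TAPE.split(',')
--
--             if len(row) == 8:
--                 try:
--                     TAPE_table[TAPE] += nRead
--                 except:
--                     TAPE_table[TAPE] = nRead
--
--     TAPE_table = dict(sorted(TAPE_table.items(), key=lambda item: item[1], reverse=True))
--
--     return TAPE_table, Total_reads
-- ===== SOURCE B (Python) =====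
-- def TAPE_correction(plate_loc, Seq_table):
--     # Staged pipeline instead of one accumulating loop: normalize each key to its
--     # TAPE string, then group-by TAPE over the normalized pair list, then sort.
--
--     def normalize(k):
--         row = k.split(',')
--         kept = []
--         for seg in row[1:7]:
--             if seg[3:] == 'GGAT':
--                 kept.append(seg)
--             else:
--                 break
--         suffix = '-' + row[1][:3] if kept else '-Non'
--         body = ','.join(kept + ['None'] * (6 - len(kept)))
--         return plate_loc + ',' + row[0] + suffix + ',' + body
--
--     pairs = [(normalize(k), n) for k, n in Seq_table.items()]
--     total = sum(n for _, n in Seq_table.items())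
--     valid = [(t, n) for t, n in pairs if len(t.split(',')) == 8]
--     keys = list(dict.fromkeys(t for t, _ in valid))
--     table = {t: sum(n for t2, n in valid if t2 == t) for t in keys}
--     table = dict(sorted(table.items(), key=lambda it: it[1], reverse=True))
--     return table, total
-- ===== Notes on version B (the rewrite author's own statement) =====
-- stated objective: alternative
-- what changed: Replaces A's single accumulating loop (6-deep nested-if staircase feeding a try/except dict accumulator) by a staged pipeline: a normalize step with a for/break loop and one padded join, a filter, a group-by over first-occurrence keys with per-key sums, then the sort; trades the hash accumulator for an O(k*n) group-by.
import Mathlib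
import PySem

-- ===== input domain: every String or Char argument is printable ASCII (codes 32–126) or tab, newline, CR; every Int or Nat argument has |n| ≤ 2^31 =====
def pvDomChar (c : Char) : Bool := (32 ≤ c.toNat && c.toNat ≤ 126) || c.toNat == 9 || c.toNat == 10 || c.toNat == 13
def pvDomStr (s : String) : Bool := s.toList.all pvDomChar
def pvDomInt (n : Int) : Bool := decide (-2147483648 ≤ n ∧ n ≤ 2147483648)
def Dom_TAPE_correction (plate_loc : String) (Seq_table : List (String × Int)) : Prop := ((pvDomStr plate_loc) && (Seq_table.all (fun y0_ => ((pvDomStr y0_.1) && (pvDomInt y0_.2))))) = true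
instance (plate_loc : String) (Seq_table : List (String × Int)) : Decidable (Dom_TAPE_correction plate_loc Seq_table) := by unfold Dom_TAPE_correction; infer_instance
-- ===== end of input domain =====

-- B restructures A's single accumulating loop with a 6-deep nested-if staircase into a staged
-- pipeline: normalize every key, filter, group-by with first-occurrence keys, then sort
-- (objective: alternative; same behaviour, different decomposition and aggregation strategy).

-- ===== PORT A =====
-- A's nested-if staircase computing the corrected TAPE string for one key (literal)
def pvTapeA (plate_loc k : String) : String :=
  let row := (PySem.Str.split? k ",").getD []
  let TargetBC_correction := [PySem.List.pyGetD row 0 ""]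
  if PySem.Str.slice (PySem.List.pyGetD row 1 "") (some 3) none == "GGAT" then
    let TAPE :=
      if PySem.Str.slice (PySem.List.pyGetD row 2 "") (some 3) none == "GGAT" then
        if PySem.Str.slice (PySem.List.pyGetD row 3 "") (some 3) none == "GGAT" then
          if PySem.Str.slice (PySem.List.pyGetD row 4 "") (some 3) none == "GGAT" then
            if PySem.Str.slice (PySem.List.pyGetD row 5 "") (some 3) none == "GGAT" then
              if PySem.Str.slice (PySem.List.pyGetD row 6 "") (some 3) none == "GGAT" then
                PySem.Str.join "," (PySem.List.slice row (some 1) (some 7))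
              else
                PySem.Str.join "," (PySem.List.slice row (some 1) (some 6)) ++ ",None"
            else
              PySem.Str.join "," (PySem.List.slice row (some 1) (some 5)) ++ ",None,None"
          else
            PySem.Str.join "," (PySem.List.slice row (some 1) (some 4)) ++ ",None,None,None"
        else
          PySem.Str.join "," (PySem.List.slice row (some 1) (some 3)) ++ ",None,None,None,None"
      else
        PySem.Str.join "," (PySem.List.slice row (some 1) (some 2)) ++ ",None,None,None,None,None"
    plate_loc ++ "," ++ PySem.List.pyGetD TargetBC_correction 0 "" ++ "-" ++
      PySem.Str.slice (PySem.List.pyGetD row 1 "") none (some 3) ++ "," ++ TAPE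
  else
    plate_loc ++ "," ++ PySem.List.pyGetD TargetBC_correction 0 "" ++ "-Non" ++
      ",None,None,None,None,None,None"

-- loop body of A's `for k,nRead in Seq_table.items()` (TAPE, Total_reads, len==8 guard, try/except)
def pvStepA (plate_loc : String) (st : PySem.Dict String Int × Int) (kv : String × Int) :
    PySem.Dict String Int × Int :=
  let row := (PySem.Str.split? kv.1 ",").getD []
  let TargetBC_correction := [PySem.List.pyGetD row 0 ""]
  if TargetBC_correction.length == 1 then
    let TAPE := pvTapeA plate_loc kv.1
    let total := st.2 + kv.2
    if ((PySem.Str.split? TAPE ",").getD []).length == 8 then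
      (match st.1.get? TAPE with
       | some v => st.1.insert TAPE (v + kv.2)
       | none   => st.1.insert TAPE kv.2, total)
    else (st.1, total)
  else st

def TAPE_correction (plate_loc : String) (Seq_table : List (String × Int)) :
    (List (String × Int)) × Int :=
  let st := (PySem.Dict.ofList Seq_table).items.foldl (pvStepA plate_loc)
    ((PySem.Dict.empty : PySem.Dict String Int), (0 : Int))
  (PySem.List.sorted st.1.items (fun item => item.2) true, st.2)

-- ===== PORT B =====
-- B's normalize: the for/break loop keeping the leading 'GGAT' segments of row[1:7]
def pvKept : List String → List String
  | [] => []
  | seg :: rest =>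
    if PySem.Str.slice seg (some 3) none == "GGAT" then seg :: pvKept rest else []

def pvNormalize (plate_loc k : String) : String :=
  let row := (PySem.Str.split? k ",").getD []
  let kept := pvKept (PySem.List.slice row (some 1) (some 7))
  let suffix :=
    if kept.isEmpty then "-Non"
    else "-" ++ PySem.Str.slice (PySem.List.pyGetD row 1 "") none (some 3)
  let body := PySem.Str.join "," (kept ++ List.replicate (6 - kept.length) "None")
  plate_loc ++ "," ++ PySem.List.pyGetD row 0 "" ++ suffix ++ "," ++ body

def TAPE_correction_alt (plate_loc : String) (Seq_table : List (String × Int)) :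
    (List (String × Int)) × Int :=
  let items := (PySem.Dict.ofList Seq_table).items
  let pairs := items.map (fun kv => (pvNormalize plate_loc kv.1, kv.2))
  let total := (items.map (fun kv => kv.2)).sum
  let valid := pairs.filter (fun p => ((PySem.Str.split? p.1 ",").getD []).length == 8)
  let keys := PySem.List.dedup (valid.map Prod.fst)
  let table := keys.map (fun t => (t, ((valid.filter (fun p => p.1 == t)).map Prod.snd).sum))
  (PySem.List.sorted table (fun it => it.2) true, total)

-- ===== PRECONDITION & SPEC =====
-- Pre_ excludes exactly the keys on which Python A raises IndexError: a key whose comma-split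
-- row is shorter than 7 and whose positions 1..len-1 all end in 'GGAT' after index 3 (then the
-- staircase asks for a row index past the end; in particular every key with fewer than 2 fields).
def Pre_TAPE_correction (plate_loc : String) (Seq_table : List (String × Int)) : Prop :=
  (Seq_table.all (fun kv =>
    let row := (PySem.Str.split? kv.1 ",").getD []
    decide (7 ≤ row.length) ||
      (decide (2 ≤ row.length) &&
        (List.range row.length).any (fun i =>
          decide (1 ≤ i) &&
            !(PySem.Str.slice (PySem.List.pyGetD row (i : Int) "") (some 3) none == "GGAT"))))) = true
instance (plate_loc : String) (Seq_table : List (String × Int)) : Decidable (Pre_TAPE_correction plate_loc Seq_table) := by unfold Pre_TAPE_correction; infer_instance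

def pvWitness_TAPE_correction : String × (List (String × Int)) :=
  ("P1", [("AAAA,CCCGGAT,TT", 3), ("AAAA,CC", 2)])

def Spec_TAPE_correction (plate_loc : String) (Seq_table : List (String × Int)) (out : (List (String × Int)) × Int) : Prop := out = TAPE_correction_alt plate_loc Seq_table
instance (plate_loc : String) (Seq_table : List (String × Int)) (out : (List (String × Int)) × Int) : Decidable (Spec_TAPE_correction plate_loc Seq_table out) := by unfold Spec_TAPE_correction; infer_instance

-- ===== CLAIM (what is proved, stated in full; the proofs are below) =====
def Claim_equal_TAPE_correction : Prop := ∀ (plate_loc : String) (Seq_table : List (String × Int)), Dom_TAPE_correction plate_loc Seq_table → Pre_TAPE_correction plate_loc Seq_table → Spec_TAPE_correction plate_loc Seq_table (TAPE_correction plate_loc Seq_table)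

-- ===== LEMMAS AND PROOFS =====

-- the ",None" padding A writes as string literals, as a function of the count
def pvNones : Nat → String
  | 0 => ""
  | j + 1 => ",None" ++ pvNones j

lemma pvJoin_cons (x : String) (ys : List String) (h : ys ≠ []) :
    PySem.Str.join "," (x :: ys) = x ++ "," ++ PySem.Str.join "," ys := by
  obtain ⟨y, t, rfl⟩ := List.exists_cons_of_ne_nil h
  apply String.toList_inj.mp
  simp [PySem.Chars.join_cons_cons]

lemma pvJoin_singleton (x : String) : PySem.Str.join "," [x] = x := by
  apply String.toList_inj.mp
  simp [PySem.Chars.join_singleton]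

lemma pvJoin_replicate_cons (x : String) (j : Nat) :
    PySem.Str.join "," (x :: List.replicate j "None") = x ++ pvNones j := by
  induction j generalizing x with
  | zero => simp [pvJoin_singleton, pvNones]
  | succ j ih =>
    rw [List.replicate_succ, pvJoin_cons x _ (by simp), ih "None", pvNones]
    apply String.toList_inj.mp
    simp

lemma pvJoin_append (xs : List String) (j : Nat) (h : xs ≠ []) :
    PySem.Str.join "," (xs ++ List.replicate j "None")
      = PySem.Str.join "," xs ++ pvNones j := by
  induction xs with
  | nil => exact absurd rfl h
  | cons x t ih =>
    cases t with
    | nil => simpa [pvJoin_singleton] using pvJoin_replicate_cons x j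
    | cons y t2 =>
      rw [List.cons_append, pvJoin_cons x ((y :: t2) ++ List.replicate j "None") (by simp),
        pvJoin_cons x (y :: t2) (by simp), ih (by simp)]
      simp [String.append_assoc]

-- a matching position means the row really has that index (getD's default "" never matches)
lemma pvLt (row : List String) (j : Nat)
    (h : (PySem.Str.slice (row.getD j "") (some 3) none == "GGAT") = true) :
    j < row.length := by
  by_contra hge
  rw [List.getD_eq_default _ _ (by omega)] at h
  exact absurd h (by decide)

-- B's slice row[1:7] indexes back into the row
lemma pvBridge (row : List String) (i : Nat) (hi : i < 6) :
    (List.take 6 (List.drop 1 row)).getD i "" = row.getD (i + 1) "" := by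
  simp [List.getD_eq_getElem?_getD, hi]

-- the for/break loop keeps exactly the first m segments when segments 1..m match and
-- segment m+1 fails (or m = 6)
lemma pvKept_take (d : List String) : ∀ (m : Nat), m ≤ 6 → d.length ≤ 6 →
    (∀ i, i < m → (PySem.Str.slice (d.getD i "") (some 3) none == "GGAT") = true) →
    (m = 6 ∨ (PySem.Str.slice (d.getD m "") (some 3) none == "GGAT") = false) →
    pvKept d = List.take m d := by
  induction d with
  | nil => intro m _ _ _ _; simp [pvKept]
  | cons s t ih =>
    intro m hm hlen h1 h2
    cases m with
    | zero =>
      have hbad : (PySem.Str.slice s (some 3) none == "GGAT") = false := by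
        rcases h2 with h | h
        · omega
        · simpa using h
      simp [pvKept, hbad]
    | succ m' =>
      have hg : (PySem.Str.slice s (some 3) none == "GGAT") = true := by
        simpa using h1 0 (Nat.succ_pos _)
      have htlen : t.length ≤ 5 := by
        have := hlen; simp only [List.length_cons] at this; omega
      have ht : pvKept t = List.take m' t := by
        apply ih m' (by omega) (by omega)
        · intro i hi; simpa using h1 (i + 1) (by omega)
        · rcases h2 with h | h
          · right
            have h5 : m' = 5 := by omega
            subst h5
            rw [List.getD_eq_default _ _ (by omega)]
            decide
          · right; simpa using h
      simp [pvKept, hg, ht]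

-- the two per-key normalizations agree (A's staircase = B's for/break loop + padded join)
lemma pvTape_eq (plate_loc k : String) : pvTapeA plate_loc k = pvNormalize plate_loc k := by
  simp only [pvTapeA, pvNormalize]
  set row := (PySem.Str.split? k ",").getD [] with hrow
  have e1 : PySem.List.pyGetD row 1 "" = row.getD 1 "" := by
    rw [PySem.List.pyGetD_of_nonneg row "" (by norm_num)]; rfl
  have e2 : PySem.List.pyGetD row 2 "" = row.getD 2 "" := by
    rw [PySem.List.pyGetD_of_nonneg row "" (by norm_num)]; rfl
  have e3 : PySem.List.pyGetD row 3 "" = row.getD 3 "" := by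
    rw [PySem.List.pyGetD_of_nonneg row "" (by norm_num)]; rfl
  have e4 : PySem.List.pyGetD row 4 "" = row.getD 4 "" := by
    rw [PySem.List.pyGetD_of_nonneg row "" (by norm_num)]; rfl
  have e5 : PySem.List.pyGetD row 5 "" = row.getD 5 "" := by
    rw [PySem.List.pyGetD_of_nonneg row "" (by norm_num)]; rfl
  have e6 : PySem.List.pyGetD row 6 "" = row.getD 6 "" := by
    rw [PySem.List.pyGetD_of_nonneg row "" (by norm_num)]; rfl
  have hslice : PySem.List.slice row (some 1) (some 7) = List.take 6 (List.drop 1 row) := by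
    rw [PySem.List.slice_toNat row (by norm_num) (by norm_num)]; rfl
  have hlen6 : (List.take 6 (List.drop 1 row)).length ≤ 6 := List.length_take_le _ _
  simp only [e1, e2, e3, e4, e5, e6, hslice]
  by_cases c1 : (PySem.Str.slice (row.getD 1 "") (some 3) none == "GGAT") = true
  case neg =>
    have hk : pvKept (List.take 6 (List.drop 1 row)) = [] := by
      rw [pvKept_take _ 0 (by omega) hlen6 (by omega)
        (Or.inr (by rw [pvBridge row 0 (by omega)]; simpa using c1))]
      rfl
    simp only [c1, hk, Bool.false_eq_true, if_false, List.isEmpty_nil, if_true,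
      List.nil_append, List.length_nil, Nat.sub_zero]
    have hJ : PySem.Str.join "," (List.replicate 6 "None") = "None,None,None,None,None,None" := by
      decide
    rw [hJ]
    apply String.toList_inj.mp
    simp [PySem.List.pyGetD_zero_cons]
  case pos =>
    by_cases c2 : (PySem.Str.slice (row.getD 2 "") (some 3) none == "GGAT") = true
    case neg =>
      have hmrow : 1 < row.length := pvLt row 1 c1
      have hk : pvKept (List.take 6 (List.drop 1 row)) = List.take 1 (List.drop 1 row) := by
        rw [pvKept_take _ 1 (by omega) hlen6
          (by intro i hi
              interval_cases i
              · rw [pvBridge row 0 (by omega)]; exact c1)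
          (Or.inr (by rw [pvBridge row 1 (by omega)]; simpa using c2))]
        rw [List.take_take]
        norm_num
      have hlenm : (List.take 1 (List.drop 1 row)).length = 1 := by
        simp only [List.length_take, List.length_drop]
        omega
      have hNe : List.take 1 (List.drop 1 row) ≠ [] := by
        intro hE; rw [hE] at hlenm; simp at hlenm
      have hsl : PySem.List.slice row (some 1) (some 2) = List.take 1 (List.drop 1 row) := by
        rw [PySem.List.slice_toNat row (by norm_num) (by norm_num)]; rfl
      simp only [c1, c2, Bool.false_eq_true, if_true, if_false, hk, hsl, hlenm,
        List.isEmpty_iff, hNe]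
      rw [pvJoin_append _ _ hNe]
      apply String.toList_inj.mp
      simp [pvNones, PySem.List.pyGetD_zero_cons]
    case pos =>
      by_cases c3 : (PySem.Str.slice (row.getD 3 "") (some 3) none == "GGAT") = true
      case neg =>
        have hmrow : 2 < row.length := pvLt row 2 c2
        have hk : pvKept (List.take 6 (List.drop 1 row)) = List.take 2 (List.drop 1 row) := by
          rw [pvKept_take _ 2 (by omega) hlen6
            (by intro i hi
                interval_cases i
                · rw [pvBridge row 0 (by omega)]; exact c1
                · rw [pvBridge row 1 (by omega)]; exact c2)
            (Or.inr (by rw [pvBridge row 2 (by omega)]; simpa using c3))]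
          rw [List.take_take]
          norm_num
        have hlenm : (List.take 2 (List.drop 1 row)).length = 2 := by
          simp only [List.length_take, List.length_drop]
          omega
        have hNe : List.take 2 (List.drop 1 row) ≠ [] := by
          intro hE; rw [hE] at hlenm; simp at hlenm
        have hsl : PySem.List.slice row (some 1) (some 3) = List.take 2 (List.drop 1 row) := by
          rw [PySem.List.slice_toNat row (by norm_num) (by norm_num)]; rfl
        simp only [c1, c2, c3, Bool.false_eq_true, if_true, if_false, hk, hsl, hlenm,
          List.isEmpty_iff, hNe]
        rw [pvJoin_append _ _ hNe]
        apply String.toList_inj.mp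
        simp [pvNones, PySem.List.pyGetD_zero_cons]
      case pos =>
        by_cases c4 : (PySem.Str.slice (row.getD 4 "") (some 3) none == "GGAT") = true
        case neg =>
          have hmrow : 3 < row.length := pvLt row 3 c3
          have hk : pvKept (List.take 6 (List.drop 1 row)) = List.take 3 (List.drop 1 row) := by
            rw [pvKept_take _ 3 (by omega) hlen6
              (by intro i hi
                  interval_cases i
                  · rw [pvBridge row 0 (by omega)]; exact c1
                  · rw [pvBridge row 1 (by omega)]; exact c2
                  · rw [pvBridge row 2 (by omega)]; exact c3)
              (Or.inr (by rw [pvBridge row 3 (by omega)]; simpa using c4))]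
            rw [List.take_take]
            norm_num
          have hlenm : (List.take 3 (List.drop 1 row)).length = 3 := by
            simp only [List.length_take, List.length_drop]
            omega
          have hNe : List.take 3 (List.drop 1 row) ≠ [] := by
            intro hE; rw [hE] at hlenm; simp at hlenm
          have hsl : PySem.List.slice row (some 1) (some 4) = List.take 3 (List.drop 1 row) := by
            rw [PySem.List.slice_toNat row (by norm_num) (by norm_num)]; rfl
          simp only [c1, c2, c3, c4, Bool.false_eq_true, if_true, if_false, hk, hsl, hlenm,
            List.isEmpty_iff, hNe]
          rw [pvJoin_append _ _ hNe]
          apply String.toList_inj.mp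
          simp [pvNones, PySem.List.pyGetD_zero_cons]
        case pos =>
          by_cases c5 : (PySem.Str.slice (row.getD 5 "") (some 3) none == "GGAT") = true
          case neg =>
            have hmrow : 4 < row.length := pvLt row 4 c4
            have hk : pvKept (List.take 6 (List.drop 1 row)) = List.take 4 (List.drop 1 row) := by
              rw [pvKept_take _ 4 (by omega) hlen6
                (by intro i hi
                    interval_cases i
                    · rw [pvBridge row 0 (by omega)]; exact c1
                    · rw [pvBridge row 1 (by omega)]; exact c2
                    · rw [pvBridge row 2 (by omega)]; exact c3
                    · rw [pvBridge row 3 (by omega)]; exact c4)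
                (Or.inr (by rw [pvBridge row 4 (by omega)]; simpa using c5))]
              rw [List.take_take]
              norm_num
            have hlenm : (List.take 4 (List.drop 1 row)).length = 4 := by
              simp only [List.length_take, List.length_drop]
              omega
            have hNe : List.take 4 (List.drop 1 row) ≠ [] := by
              intro hE; rw [hE] at hlenm; simp at hlenm
            have hsl : PySem.List.slice row (some 1) (some 5) = List.take 4 (List.drop 1 row) := by
              rw [PySem.List.slice_toNat row (by norm_num) (by norm_num)]; rfl
            simp only [c1, c2, c3, c4, c5, Bool.false_eq_true, if_true, if_false, hk, hsl, hlenm,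
              List.isEmpty_iff, hNe]
            rw [pvJoin_append _ _ hNe]
            apply String.toList_inj.mp
            simp [pvNones, PySem.List.pyGetD_zero_cons]
          case pos =>
            by_cases c6 : (PySem.Str.slice (row.getD 6 "") (some 3) none == "GGAT") = true
            case neg =>
              have hmrow : 5 < row.length := pvLt row 5 c5
              have hk : pvKept (List.take 6 (List.drop 1 row)) = List.take 5 (List.drop 1 row) := by
                rw [pvKept_take _ 5 (by omega) hlen6
                  (by intro i hi
                      interval_cases i
                      · rw [pvBridge row 0 (by omega)]; exact c1
                      · rw [pvBridge row 1 (by omega)]; exact c2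
                      · rw [pvBridge row 2 (by omega)]; exact c3
                      · rw [pvBridge row 3 (by omega)]; exact c4
                      · rw [pvBridge row 4 (by omega)]; exact c5)
                  (Or.inr (by rw [pvBridge row 5 (by omega)]; simpa using c6))]
                rw [List.take_take]
                norm_num
              have hlenm : (List.take 5 (List.drop 1 row)).length = 5 := by
                simp only [List.length_take, List.length_drop]
                omega
              have hNe : List.take 5 (List.drop 1 row) ≠ [] := by
                intro hE; rw [hE] at hlenm; simp at hlenm
              have hsl : PySem.List.slice row (some 1) (some 6) = List.take 5 (List.drop 1 row) := by
                rw [PySem.List.slice_toNat row (by norm_num) (by norm_num)]; rfl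
              simp only [c1, c2, c3, c4, c5, c6, Bool.false_eq_true, if_true, if_false, hk, hsl, hlenm,
                List.isEmpty_iff, hNe]
              rw [pvJoin_append _ _ hNe]
              apply String.toList_inj.mp
              simp [pvNones, PySem.List.pyGetD_zero_cons]
            case pos =>
              have hmrow : 6 < row.length := pvLt row 6 c6
              have hk : pvKept (List.take 6 (List.drop 1 row)) = List.take 6 (List.drop 1 row) := by
                rw [pvKept_take _ 6 (by omega) hlen6
                  (by intro i hi
                      interval_cases i
                      · rw [pvBridge row 0 (by omega)]; exact c1
                      · rw [pvBridge row 1 (by omega)]; exact c2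
                      · rw [pvBridge row 2 (by omega)]; exact c3
                      · rw [pvBridge row 3 (by omega)]; exact c4
                      · rw [pvBridge row 4 (by omega)]; exact c5
                      · rw [pvBridge row 5 (by omega)]; exact c6)
                  (Or.inl rfl)]
                rw [List.take_take]
                norm_num
              have hlenm : (List.take 6 (List.drop 1 row)).length = 6 := by
                simp only [List.length_take, List.length_drop]
                omega
              have hNe : List.take 6 (List.drop 1 row) ≠ [] := by
                intro hE; rw [hE] at hlenm; simp at hlenm
              simp only [c1, c2, c3, c4, c5, c6, if_true, hk, hlenm, List.isEmpty_iff, hNe, Nat.sub_self, List.replicate_zero, List.append_nil]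
              apply String.toList_inj.mp
              simp [PySem.List.pyGetD_zero_cons]

-- the weighted-counter insert B's group-by must match, and the per-key sum
def pvIns (d : PySem.Dict String Int) (p : String × Int) : PySem.Dict String Int :=
  d.insert p.1 (d.getD p.1 0 + p.2)

def pvS (l : List (String × Int)) (k : String) : Int :=
  ((l.filter (fun p => p.1 == k)).map Prod.snd).sum

lemma pvS_append (l : List (String × Int)) (p : String × Int) (k : String) :
    pvS (l ++ [p]) k = pvS l k + (if p.1 == k then p.2 else 0) := by
  by_cases h : (p.1 == k) = true <;>
    simp [pvS, List.filter_append, List.filter, h]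

-- A's loop body, rewritten as pair of independent accumulators
lemma pvStepA_pair (plate_loc : String) (st : PySem.Dict String Int × Int) (kv : String × Int) :
    pvStepA plate_loc st kv =
      ((fun (d : PySem.Dict String Int) (x : String × Int) =>
          if ((PySem.Str.split? (pvTapeA plate_loc x.1) ",").getD []).length == 8
          then pvIns d (pvTapeA plate_loc x.1, x.2) else d) st.1 kv, st.2 + kv.2) := by
  show (if (([PySem.List.pyGetD ((PySem.Str.split? kv.1 ",").getD []) 0 ""].length == 1) = true)
      then (if ((PySem.Str.split? (pvTapeA plate_loc kv.1) ",").getD []).length == 8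
            then (match st.1.get? (pvTapeA plate_loc kv.1) with
                  | some v => st.1.insert (pvTapeA plate_loc kv.1) (v + kv.2)
                  | none   => st.1.insert (pvTapeA plate_loc kv.1) kv.2, st.2 + kv.2)
            else (st.1, st.2 + kv.2))
      else st) = _
  rw [if_pos (show ([PySem.List.pyGetD ((PySem.Str.split? kv.1 ",").getD []) 0 ""].length == 1) = true from rfl)]
  beta_reduce
  by_cases h : ((((PySem.Str.split? (pvTapeA plate_loc kv.1) ",").getD []).length == 8) = true)
  · rw [if_pos h, if_pos h]
    cases hg : st.1.get? (pvTapeA plate_loc kv.1) <;>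
      simp [pvIns, PySem.Dict.getD_eq_get?_getD, hg]
  · rw [if_neg h, if_neg h]

-- loop over mapped-and-guarded elements = fold over the mapped-then-filtered list
lemma pvFuse {α β γ : Type} (f : α → β) (P : β → Bool) (step : γ → β → γ) :
    ∀ (l : List α) (init : γ),
      List.foldl (fun d x => if P (f x) then step d (f x) else d) init l
        = List.foldl step init ((l.map f).filter P) := by
  intro l
  induction l with
  | nil => intro init; rfl
  | cons x t ih =>
    intro init
    by_cases h : P (f x) = true <;> simp [h, ih]

lemma pvAgg_keys (l : List (String × Int)) :
    (List.foldl pvIns PySem.Dict.empty l).keys = PySem.Set.ofList (l.map Prod.fst) := by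
  have h := PySem.Dict.keys_foldl_insert_key (ν := Int) l Prod.fst
    (fun d p => d.getD p.1 0 + p.2) PySem.Dict.empty
  rw [show (List.foldl pvIns PySem.Dict.empty l)
      = List.foldl (fun d (x : String × Int) => d.insert x.1 (d.getD x.1 0 + x.2))
          PySem.Dict.empty l from rfl]
  rw [h, PySem.Dict.keys_empty, PySem.Set.update_nil_left]

lemma pvAgg_nodup (l : List (String × Int)) :
    (List.foldl pvIns PySem.Dict.empty l).keys.Nodup := by
  rw [show (List.foldl pvIns PySem.Dict.empty l)
      = List.foldl (fun d (x : String × Int) => d.insert x.1 (d.getD x.1 0 + x.2))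
          PySem.Dict.empty l from rfl]
  exact PySem.Dict.nodup_keys_foldl_insert_key l Prod.fst _ _ PySem.Dict.nodup_keys_empty

-- the weighted-counter fold IS the group-by: first-occurrence keys paired with per-key sums
lemma pvAgg_items (l : List (String × Int)) :
    (List.foldl pvIns PySem.Dict.empty l).items
      = (PySem.Set.ofList (l.map Prod.fst)).map (fun k => (k, pvS l k)) := by
  induction l using List.reverseRecOn with
  | nil => rfl
  | append_singleton l p ih =>
    rw [List.foldl_append]
    simp only [List.foldl_cons, List.foldl_nil]
    have hnd := pvAgg_nodup l
    have hkeys := pvAgg_keys l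
    by_cases hm : p.1 ∈ l.map Prod.fst
    · have hcontT : (List.foldl pvIns PySem.Dict.empty l).contains p.1 = true := by
        rw [PySem.Dict.contains_eq_decide_mem_keys, hkeys]
        simpa [PySem.Set.mem_ofList] using hm
      have hgd : (List.foldl pvIns PySem.Dict.empty l).getD p.1 0 = pvS l p.1 := by
        have hmem : (p.1, pvS l p.1) ∈ (List.foldl pvIns PySem.Dict.empty l).items := by
          rw [ih]
          exact List.mem_map_of_mem ((PySem.Set.mem_ofList _ _).mpr hm)
        exact PySem.Dict.getD_of_mem_items _ hmem hnd 0
      show ((List.foldl pvIns PySem.Dict.empty l).insert p.1 _).items = _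
      rw [PySem.Dict.items_insert_of_contains _ _ hcontT, ih, hgd, List.map_map]
      simp only [List.map_append, List.map_cons, List.map_nil]
      rw [PySem.Set.ofList_append_singleton,
        PySem.Set.add_of_mem ((PySem.Set.mem_ofList _ _).mpr hm)]
      apply List.map_congr_left
      intro k _
      by_cases hkp : k = p.1
      · subst hkp
        simp [pvS_append]
      · have : (k == p.1) = false := by simpa using hkp
        simp [Function.comp, this, pvS_append, BEq.comm (a := p.1) (b := k)]
    · have hcontF : (List.foldl pvIns PySem.Dict.empty l).contains p.1 = false := by
        rw [PySem.Dict.contains_eq_decide_mem_keys, hkeys]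
        simpa [PySem.Set.mem_ofList] using hm
      have hgd : (List.foldl pvIns PySem.Dict.empty l).getD p.1 0 = 0 :=
        PySem.Dict.getD_of_not_contains _ _ hcontF
      show ((List.foldl pvIns PySem.Dict.empty l).insert p.1 _).items = _
      rw [PySem.Dict.items_insert_of_not_contains _ _ hcontF, ih, hgd]
      simp only [List.map_append, List.map_cons, List.map_nil]
      rw [PySem.Set.ofList_append_singleton,
        PySem.Set.add_of_not_mem (by simpa [PySem.Set.mem_ofList] using hm), List.map_append]
      congr 1
      · apply List.map_congr_left
        intro k hk
        have hkp : (p.1 == k) = false := by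
          have : k ≠ p.1 := by
            intro h; subst h; exact hm ((PySem.Set.mem_ofList _ _).mp hk)
          simpa using fun h => this h.symm
        simp [pvS_append, hkp]
      · have : pvS (l ++ [p]) p.1 = p.2 := by
          have h0 : pvS l p.1 = 0 := by
            have : l.filter (fun q => q.1 == p.1) = [] := by
              apply List.filter_eq_nil_iff.mpr
              intro q hq
              simp only [Bool.not_eq_true, beq_eq_false_iff_ne, ne_eq]
              intro h; exact hm (h ▸ List.mem_map_of_mem hq)
            simp [pvS, this]
          simp [pvS_append, h0]
        simp [this]

theorem TAPE_correction_spec : Claim_equal_TAPE_correction := by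
  intro plate_loc Seq_table _ _
  unfold Spec_TAPE_correction
  simp only [TAPE_correction, TAPE_correction_alt]
  have hfun : pvStepA plate_loc = fun (st : PySem.Dict String Int × Int) (kv : String × Int) =>
      ((fun (d : PySem.Dict String Int) (x : String × Int) =>
          if (fun (p : String × Int) => ((PySem.Str.split? p.1 ",").getD []).length == 8)
               ((fun (kv : String × Int) => (pvNormalize plate_loc kv.1, kv.2)) x)
          then pvIns d ((fun (kv : String × Int) => (pvNormalize plate_loc kv.1, kv.2)) x)
          else d) st.1 kv,
        (fun (a : Int) (x : String × Int) => a + x.2) st.2 kv) := by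
    funext st kv
    rw [pvStepA_pair]
    simp only [pvTape_eq]
  rw [hfun, PySem.List.foldl_prod_mk
    (f := fun (d : PySem.Dict String Int) (x : String × Int) =>
      if (fun (p : String × Int) => ((PySem.Str.split? p.1 ",").getD []).length == 8)
           ((fun (kv : String × Int) => (pvNormalize plate_loc kv.1, kv.2)) x)
      then pvIns d ((fun (kv : String × Int) => (pvNormalize plate_loc kv.1, kv.2)) x)
      else d)
    (g := fun (a : Int) (x : String × Int) => a + x.2),
    pvFuse (fun (kv : String × Int) => (pvNormalize plate_loc kv.1, kv.2))
      (fun (p : String × Int) => ((PySem.Str.split? p.1 ",").getD []).length == 8) pvIns,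
    pvAgg_items]
  simp only [PySem.List.foldl_add, zero_add, PySem.List.dedup_eq_ofList, pvS]

-- ===== VERDICT (by name: the statement is the Claim_ definition above) =====
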